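-- pv_equiv track=rewrite | github.com/grexor/pybio | utils/__init__.py | coverage_to_intervals
-- ===== SOURCE A (Python) =====
-- def coverage_to_intervals(coverage):
--     """
--     | input: coverage={10:"5", 12:"5", 13:"o", 14:"o", 25:'3', 26:'3',27:'5'}
--     | output: [(10, 10, '5'), (12, 12, '5'), (13, 14, 'o'), (25, 26, '3'), (27, 27, '5')]
--     | intervals are inclusive left and right
--     """
--     if len(coverage)==0:
--         return [] # no coverage? no intervals
--     L = []
--     i = None
--     val_index = min(coverage.keys())
--     val = coverage[val_index]
--     for i in range(min(coverage.keys())+1, max(coverage.keys())+1):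
--         new_val = coverage.get(i, None)
--         if val!=None and new_val!=None and val!=new_val:
--             L.append((val_index, i-1, val))
--             val = new_val
--             val_index = i
--         if val!=None and new_val==None:
--             L.append((val_index, i-1, val))
--             val = new_val
--             val_index = i
--         if val==None and new_val!=None:
--             val = new_val
--             val_index = i
--     if i!=None:
--         L.append((val_index, i, val))
--     return L
-- ===== SOURCE B (Python) =====
-- def coverage_to_intervals(coverage):
--     if not coverage:
--         return []
--     out = []
--     ks = sorted(coverage)
--     start = prev = ks[0]
--     val = coverage[start]
--     for k in ks[1:]:
--         v = coverage[k]
--         if k == prev + 1 and v == val: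
--             prev = k
--         else:
--             out.append((start, prev, val))
--             start = prev = k
--             val = v
--     out.append((start, prev, val))
--     return out
-- ===== Notes on version B (the rewrite author's own statement) =====
-- stated objective: alternative
-- what changed: B sorts the dict's n distinct keys and groups consecutive equal-value runs in one scan over the keys, instead of A's scan over every integer position from min(keys) to max(keys).
-- intended difference: On a coverage dict with exactly one distinct key A returns the empty list (its loop range is empty so the closing append is skipped), while B returns the intended single one-point interval covering that key. — e.g. on coverage_to_intervals([(10, "5")]): A returns [], B returns [(10, 10, "5")]
import Mathlib
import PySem

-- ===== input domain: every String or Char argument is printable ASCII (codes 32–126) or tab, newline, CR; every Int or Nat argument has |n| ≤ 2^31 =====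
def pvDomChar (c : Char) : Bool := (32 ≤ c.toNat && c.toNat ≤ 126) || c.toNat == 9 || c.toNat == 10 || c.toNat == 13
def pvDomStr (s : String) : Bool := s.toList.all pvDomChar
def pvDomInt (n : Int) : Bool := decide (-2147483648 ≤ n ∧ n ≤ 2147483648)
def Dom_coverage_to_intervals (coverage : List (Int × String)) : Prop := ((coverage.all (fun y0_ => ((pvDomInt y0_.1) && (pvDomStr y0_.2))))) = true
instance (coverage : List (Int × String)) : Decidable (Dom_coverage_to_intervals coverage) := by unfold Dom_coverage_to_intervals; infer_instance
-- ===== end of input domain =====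

-- B sorts the dict's distinct keys and groups consecutive equal-value runs in one scan over the
-- keys, instead of A's scan over every integer position between min and max key; on single-key
-- input A skips its final append while B returns the one-point interval (see D_).


-- shared dict primitive: coverage.get(k) on the association list (first match)
def dictGet? (d : List (Int × String)) (k : Int) : Option String :=
  match d with
  | [] => none
  | (k', v) :: t => if k = k' then some v else dictGet? t k

-- ===== PORT A =====
-- one iteration of A's for-loop: state = (L, val, val_index); the three sequential ifs kept in order
def aStep (cov : List (Int × String)) (st : List (Int × Int × String) × Option String × Int)
    (i : Int) : List (Int × Int × String) × Option String × Int :=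
  let L := st.1
  let val := st.2.1
  let idx := st.2.2
  let newVal := dictGet? cov i
  let st1 :=
    if val ≠ none ∧ newVal ≠ none ∧ val ≠ newVal then
      (L ++ [(idx, i - 1, val.getD "")], newVal, i)
    else (L, val, idx)
  let st2 :=
    if st1.2.1 ≠ none ∧ newVal = none then
      (st1.1 ++ [(st1.2.2, i - 1, st1.2.1.getD "")], newVal, i)
    else st1
  if st2.2.1 = none ∧ newVal ≠ none then (st2.1, newVal, i) else st2

def coverage_to_intervals (coverage : List (Int × String)) : List (Int × Int × String) :=
  if coverage.length = 0 then []
  else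
    match PySem.List.min? (coverage.map Prod.fst) (fun x => x) with
    | none => [] -- unreachable: coverage is nonempty
    | some m =>
      let M := (PySem.List.max? (coverage.map Prod.fst) (fun x => x)).getD m
      let val := dictGet? coverage m   -- coverage[val_index]; m is a key, so this is `some`
      let rng := PySem.List.pyRange (m + 1) (M + 1) 1
      let st := rng.foldl (aStep coverage) ([], val, m)
      -- `if i != None`: i is the last element of the range, None iff the loop never ran
      match rng.getLast? with
      | none => st.1
      | some i => st.1 ++ [(st.2.2, i, st.2.1.getD "")]  -- val is a str here in Python

-- ===== PORT B =====
-- one iteration of B's for-loop: state = (out, start, prev, val)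
def bStep (cov : List (Int × String)) (st : List (Int × Int × String) × Int × Int × String)
    (k : Int) : List (Int × Int × String) × Int × Int × String :=
  let out := st.1
  let start := st.2.1
  let prev := st.2.2.1
  let val := st.2.2.2
  let v := (dictGet? cov k).getD ""   -- coverage[k]; k is a key, so this is `some`
  if k = prev + 1 ∧ v = val then (out, start, k, val)
  else (out ++ [(start, prev, val)], k, k, v)

def coverage_to_intervals_alt (coverage : List (Int × String)) : List (Int × Int × String) :=
  match coverage with
  | [] => []
  | _ =>
    -- sorted(coverage): the dict's distinct keys, sorted
    let ks := PySem.List.sorted (PySem.Set.ofList (coverage.map Prod.fst)) (fun x => x) false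
    match ks with
    | [] => [] -- unreachable: coverage is nonempty
    | k0 :: rest =>
      let val := (dictGet? coverage k0).getD ""   -- coverage[ks[0]]; k0 is a key
      let st := rest.foldl (bStep coverage) ([], k0, k0, val)
      st.1 ++ [(st.2.1, st.2.2.1, st.2.2.2)]

-- ===== PRECONDITION & SPEC =====
-- On a coverage dict with exactly one distinct key A returns the empty list (its loop range is
-- empty, so the closing append is skipped), while B returns the intended single one-point interval.
def D_coverage_to_intervals (coverage : List (Int × String)) : Prop :=
  coverage ≠ [] ∧ ∀ p ∈ coverage, ∀ q ∈ coverage, p.1 = q.1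
instance (coverage : List (Int × String)) : Decidable (D_coverage_to_intervals coverage) := by
  unfold D_coverage_to_intervals; infer_instance

def Spec_coverage_to_intervals (coverage : List (Int × String)) (out : List (Int × Int × String)) : Prop :=
  ¬ D_coverage_to_intervals coverage → out = coverage_to_intervals_alt coverage
instance (coverage : List (Int × String)) (out : List (Int × Int × String)) : Decidable (Spec_coverage_to_intervals coverage out) := by
  unfold Spec_coverage_to_intervals; infer_instance

def pvDiffWitness_coverage_to_intervals : (List (Int × String)) := [(10, "5")]
def pvDiffWitnessOut_coverage_to_intervals : (List (Int × Int × String)) × (List (Int × Int × String)) :=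
  ([], [(10, 10, "5")])

-- ===== CLAIM (what is proved, stated in full; the proofs are below) =====
def Claim_unchanged_coverage_to_intervals : Prop := ∀ (coverage : List (Int × String)), Dom_coverage_to_intervals coverage → Spec_coverage_to_intervals coverage (coverage_to_intervals coverage)
def Claim_changed_coverage_to_intervals : Prop := Dom_coverage_to_intervals (pvDiffWitness_coverage_to_intervals) ∧ D_coverage_to_intervals (pvDiffWitness_coverage_to_intervals) ∧ coverage_to_intervals (pvDiffWitness_coverage_to_intervals) = pvDiffWitnessOut_coverage_to_intervals.1 ∧ coverage_to_intervals_alt (pvDiffWitness_coverage_to_intervals) = pvDiffWitnessOut_coverage_to_intervals.2 ∧ pvDiffWitnessOut_coverage_to_intervals.1 ≠ pvDiffWitnessOut_coverage_to_intervals.2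
def Claim_exact_coverage_to_intervals : Prop := ∀ (coverage : List (Int × String)), Dom_coverage_to_intervals coverage → D_coverage_to_intervals coverage → coverage_to_intervals coverage ≠ coverage_to_intervals_alt coverage

-- ===== LEMMAS AND PROOFS =====

-- A's closing append (with the final loop index M) and B's closing append
def aClose (M : Int) (st : List (Int × Int × String) × Option String × Int) : List (Int × Int × String) :=
  st.1 ++ [(st.2.2, M, st.2.1.getD "")]
def bClose (st : List (Int × Int × String) × Int × Int × String) : List (Int × Int × String) :=
  st.1 ++ [(st.2.1, st.2.2.1, st.2.2.2)]

theorem dictGet?_isSome_iff (cov : List (Int × String)) (k : Int) :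
    (dictGet? cov k).isSome ↔ k ∈ cov.map Prod.fst := by
  induction cov with
  | nil => simp [dictGet?]
  | cons p t ih =>
    obtain ⟨k', v⟩ := p
    by_cases h : k = k' <;> simp [dictGet?, h, ih]

theorem dictGet?_eq_none (cov : List (Int × String)) (k : Int)
    (h : k ∉ cov.map Prod.fst) : dictGet? cov k = none := by
  have := (dictGet?_isSome_iff cov k).not.mpr h
  simpa [Option.not_isSome_iff_eq_none] using this

-- in a strictly increasing list every element is bounded by the last one
theorem le_getLast?_of_pairwise_lt (l : List Int) (h : l.Pairwise (· < ·)) :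
    ∀ y z : Int, y ∈ l → l.getLast? = some z → y ≤ z := by
  induction l with
  | nil => intro y z hy; simp at hy
  | cons a t ih =>
    intro y z hy hz
    rcases List.pairwise_cons.mp h with ⟨ha, ht⟩
    cases t with
    | nil =>
      simp at hy hz; omega
    | cons b u =>
      rw [List.getLast?_cons_cons] at hz
      rcases List.mem_cons.mp hy with rfl | hy'
      · have hb : b ∈ b :: u := List.mem_cons_self
        have h1 := ih ht b z hb hz
        have h2 := ha b hb
        omega
      · exact ih ht y z hy' hz

theorem getLastD_cons_irrel (a : Int) (l : List Int) (d d' : Int) :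
    (a :: l).getLastD d = (a :: l).getLastD d' := by
  induction l generalizing a with
  | nil => rfl
  | cons b u ih => simp [List.getLastD]

-- the gap lemma, none state: positions with no coverage leave a (L, none, idx) state unchanged
theorem gap_none (cov : List (Int × String)) (q : Int) :
    ∀ (p : Int) (L : List (Int × Int × String)) (idx : Int),
      (∀ x, p ≤ x → x < q → dictGet? cov x = none) →
      (PySem.List.pyRange p q 1).foldl (aStep cov) (L, none, idx) = (L, none, idx) := by
  intro p
  by_cases hpq : q ≤ p
  · intro L idx _; rw [PySem.List.pyRange_one_eq_nil hpq]; rfl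
  · have hlt : p < q := by omega
    intro L idx hnone
    rw [PySem.List.pyRange_one_cons hlt]
    have hstep : aStep cov (L, none, idx) p = (L, none, idx) := by
      have h0 : dictGet? cov p = none := hnone p le_rfl hlt
      simp [aStep, h0]
    rw [List.foldl_cons, hstep]
    exact gap_none cov q (p + 1) L idx (fun x hx hxq => hnone x (by omega) hxq)
termination_by p => (q - p).toNat
decreasing_by omega

-- the gap lemma, open-run state: the first uncovered position closes the run
theorem gap_some (cov : List (Int × String)) (p q : Int) (hlt : p < q)
    (hnone : ∀ x, p ≤ x → x < q → dictGet? cov x = none)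
    (L : List (Int × Int × String)) (v : String) (start : Int) :
    (PySem.List.pyRange p q 1).foldl (aStep cov) (L, some v, start)
      = (L ++ [(start, p - 1, v)], none, p) := by
  rw [PySem.List.pyRange_one_cons hlt]
  have h0 : dictGet? cov p = none := hnone p le_rfl hlt
  have hstep : aStep cov (L, some v, start) p = (L ++ [(start, p - 1, v)], none, p) := by
    simp [aStep, h0]
  rw [List.foldl_cons, hstep]
  exact gap_none cov q (p + 1) _ _ (fun x hx hxq => hnone x (by omega) hxq)

-- MAIN LEMMA: with an open run (start, v) and remaining sorted keys ks lying at positions ≥ p,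
-- A's position scan from p up to the last key, closed by its final append, produces exactly
-- B's grouping fold over ks closed by its final append.
theorem scan_eq_group (cov : List (Int × String)) (ks : List Int) :
    ∀ (p start : Int) (v : String) (L : List (Int × Int × String)),
      ks.Pairwise (· < ·) →
      (∀ k ∈ ks, p ≤ k) →
      (∀ k ∈ ks, (dictGet? cov k).isSome) →
      (∀ x, p ≤ x → x ≤ ks.getLastD (p - 1) → x ∉ ks → dictGet? cov x = none) →
      aClose (ks.getLastD (p - 1))
        ((PySem.List.pyRange p (ks.getLastD (p - 1) + 1) 1).foldl (aStep cov) (L, some v, start))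
      = bClose (ks.foldl (bStep cov) (L, start, p - 1, v)) := by
  induction ks with
  | nil =>
    intro p start v L _ _ _ _
    simp only [List.getLastD_nil]
    rw [show p - 1 + 1 = p by omega, PySem.List.pyRange_one_eq_nil le_rfl]
    simp [aClose, bClose]
  | cons k ks ih =>
    intro p start v L hsorted hge hsome hnone
    rcases List.pairwise_cons.mp hsorted with ⟨hklt, hks⟩
    have hpk : p ≤ k := hge k List.mem_cons_self
    obtain ⟨w, hw⟩ := Option.isSome_iff_exists.mp (hsome k List.mem_cons_self)
    cases ks with
    | nil =>
      -- last key: the scan range ends at k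
      simp only [List.getLastD_cons, List.getLastD_nil] at *
      by_cases hpk' : p = k
      · subst hpk'
        rw [PySem.List.pyRange_one_cons (by omega), PySem.List.pyRange_one_eq_nil (by omega)]
        by_cases hvw : w = v
        · subst hvw
          simp [aStep, bStep, aClose, bClose, hw]
        · simp [aStep, bStep, aClose, bClose, hw, hvw, Ne.symm hvw]
      · have hlt : p < k := by omega
        rw [PySem.List.pyRange_one_append p k (k + 1) (by omega) (by omega),
            List.foldl_append,
            gap_some cov p k hlt
              (fun x hx hxk => hnone x hx (by omega) (by simp; omega)) L v start,
            PySem.List.pyRange_one_cons (by omega), PySem.List.pyRange_one_eq_nil (by omega)]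
        simp [aStep, bStep, aClose, bClose, hw, show ¬ k = p by omega]
    | cons k2 ks' =>
      -- more keys follow: peel the step at k and use the IH from p = k+1
      have hM : (k :: k2 :: ks').getLastD (p - 1) = (k2 :: ks').getLastD k := by
        rw [List.getLastD_cons]
      have hMlast : (k2 :: ks').getLast? = some ((k2 :: ks').getLastD k) := by
        cases h : (k2 :: ks').getLast? with
        | none => simp at h
        | some z => simp [List.getLastD_eq_getLast?, h]
      have hk2M : k2 ≤ (k2 :: ks').getLastD k :=
        le_getLast?_of_pairwise_lt _ hks k2 _ List.mem_cons_self hMlast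
      have hkk2 : k < k2 := hklt k2 List.mem_cons_self
      set M := (k2 :: ks').getLastD k with hMdef
      have hkM : k < M := by omega
      have hMrec : (k2 :: ks').getLastD (k + 1 - 1) = M := by
        rw [hMdef]; exact getLastD_cons_irrel k2 ks' (k + 1 - 1) k
      have hge' : ∀ k' ∈ k2 :: ks', k + 1 ≤ k' := fun k' hk' => by have := hklt k' hk'; omega
      have hsome' : ∀ k' ∈ k2 :: ks', (dictGet? cov k').isSome := fun k' hk' => hsome k' (by simp [hk'])
      have hnone' : ∀ x, k + 1 ≤ x → x ≤ (k2 :: ks').getLastD (k + 1 - 1) → x ∉ (k2 :: ks') →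
          dictGet? cov x = none := by
        intro x hx1 hx2 hx3
        rw [hMrec] at hx2
        refine hnone x (by omega) (by rw [hM]; exact hx2) ?_
        intro hmem
        rcases List.mem_cons.mp hmem with rfl | h
        · omega
        · exact hx3 h
      have ihk := fun start v L => ih (k + 1) start v L hks hge' hsome' hnone'
      rw [hMrec] at ihk
      rw [hM]
      rw [PySem.List.pyRange_one_append p k (M + 1) (by omega) (by omega), List.foldl_append]
      by_cases hpk' : p = k
      · rw [PySem.List.pyRange_one_eq_nil (by omega), List.foldl_nil,
            PySem.List.pyRange_one_cons (by omega), List.foldl_cons, List.foldl_cons]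
        by_cases hvw : w = v
        · have hstep : aStep cov (L, some v, start) k = (L, some v, start) := by
            simp [aStep, hw, hvw]
          have hbstep : bStep cov (L, start, p - 1, v) k = (L, start, k, v) := by
            simp [bStep, hpk', hw, hvw]
          rw [hstep, hbstep]
          have := ihk start v L
          rw [show k + 1 - 1 = k by omega] at this
          exact this
        · have hstep : aStep cov (L, some v, start) k
              = (L ++ [(start, p - 1, v)], some w, k) := by
            simp [aStep, hw, Ne.symm hvw, hpk']
          have hbstep : bStep cov (L, start, p - 1, v) k
              = (L ++ [(start, p - 1, v)], k, k, w) := by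
            simp [bStep, hw, hvw]
          rw [hstep, hbstep]
          have := ihk k w (L ++ [(start, p - 1, v)])
          rw [show k + 1 - 1 = k by omega] at this
          exact this
      · have hlt : p < k := by omega
        rw [gap_some cov p k hlt
              (fun x hx hxk => hnone x hx (by rw [hM]; omega) (by
                simp only [List.mem_cons, not_or]
                refine ⟨by omega, fun hx2 => ?_, fun hx3 => ?_⟩
                · have := hge' x (by simp [hx2]); omega
                · have := hge' x (by simp [hx3]); omega)) L v start,
            PySem.List.pyRange_one_cons (by omega), List.foldl_cons, List.foldl_cons]
        have hstep : aStep cov (L ++ [(start, p - 1, v)], none, p) k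
            = (L ++ [(start, p - 1, v)], some w, k) := by
          simp [aStep, hw]
        have hbstep : bStep cov (L, start, p - 1, v) k
            = (L ++ [(start, p - 1, v)], k, k, w) := by
          simp [bStep, hw, show ¬ k = p by omega]
        rw [hstep, hbstep]
        have := ihk k w (L ++ [(start, p - 1, v)])
        rw [show k + 1 - 1 = k by omega] at this
        exact this

-- the sorted distinct-key list of a nonempty coverage is nonempty and characterises min/max
theorem coverage_to_intervals_eq_alt (c : Int × String) (t : List (Int × String))
    (hnd : ¬ D_coverage_to_intervals (c :: t)) :
    coverage_to_intervals (c :: t) = coverage_to_intervals_alt (c :: t) := by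
  set cov := c :: t with hcov
  set keys := cov.map Prod.fst with hkeys
  have hc1 : c.1 ∈ keys := by rw [hkeys, hcov]; simp
  have hpair := PySem.List.sorted_ofList_pairwise_lt (κ := Int) keys
  have hmem : ∀ x : Int, x ∈ PySem.List.sorted (PySem.Set.ofList keys) (fun x => x) false ↔ x ∈ keys := by
    intro x
    rw [PySem.List.mem_sorted, PySem.Set.mem_ofList]
  cases hks : PySem.List.sorted (PySem.Set.ofList keys) (fun x => x) false with
  | nil =>
    exfalso
    have := (hmem c.1).mpr hc1
    rw [hks] at this
    simp at this
  | cons k0 rest =>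
    rw [hks] at hpair hmem
    rcases List.pairwise_cons.mp hpair with ⟨hk0lt, hrestp⟩
    have hk0keys : k0 ∈ keys := (hmem k0).mp List.mem_cons_self
    have hk0le : ∀ y ∈ keys, k0 ≤ y :=
      fun y hy => PySem.List.key_head_sorted_le (PySem.Set.ofList keys) (fun x => x) hks y
        ((PySem.Set.mem_ofList keys y).mpr hy)
    have hmin : PySem.List.min? keys (fun x => x) = some k0 := by
      cases h : PySem.List.min? keys (fun x => x) with
      | none =>
        rw [PySem.List.min?_eq_none_iff] at h
        rw [h] at hc1; simp at hc1
      | some m =>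
        have hm1 : m ∈ keys := PySem.List.min?_mem h
        have hm2 := PySem.List.min?_isMin h k0 hk0keys
        have hm3 := hk0le m hm1
        have : m = k0 := by omega
        rw [this]
    -- the last element of the sorted key list is the maximum key
    set Mv := (k0 :: rest).getLastD 0 with hMv
    have hlast : (k0 :: rest).getLast? = some Mv := by
      cases h : (k0 :: rest).getLast? with
      | none => simp at h
      | some z => simp [hMv, List.getLastD_eq_getLast?, h]
    have hMvmem : Mv ∈ keys := (hmem Mv).mp (List.mem_of_getLast? hlast)
    have hMvmax : ∀ y ∈ keys, y ≤ Mv := fun y hy =>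
      le_getLast?_of_pairwise_lt _ hpair y Mv ((hmem y).mpr hy) hlast
    have hmax : PySem.List.max? keys (fun x => x) = some Mv := by
      cases h : PySem.List.max? keys (fun x => x) with
      | none =>
        rw [PySem.List.max?_eq_none_iff] at h
        rw [h] at hc1; simp at hc1
      | some m =>
        have hm1 : m ∈ keys := PySem.List.max?_mem h
        have hm2 := PySem.List.max?_isMax h Mv hMvmem
        have hm3 := hMvmax m hm1
        have : m = Mv := by omega
        rw [this]
    -- ¬D_ gives a second distinct key, hence rest ≠ [] and k0 < Mv
    have hrest : rest ≠ [] := by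
      intro h0
      apply hnd
      refine ⟨by simp [hcov], ?_⟩
      intro p hp q hq
      have hp1 : p.1 ∈ keys := by rw [hkeys]; exact List.mem_map_of_mem hp
      have hq1 : q.1 ∈ keys := by rw [hkeys]; exact List.mem_map_of_mem hq
      have hp2 := (hmem p.1).mpr hp1
      have hq2 := (hmem q.1).mpr hq1
      rw [h0] at hp2 hq2
      simp at hp2 hq2
      omega
    have hk0Mv : k0 < Mv := by
      cases hr : rest with
      | nil => exact absurd hr hrest
      | cons k1 rest' =>
        have h1 : k0 < k1 := hk0lt k1 (by simp [hr])
        have h2 : k1 ≤ Mv := hMvmax k1 ((hmem k1).mp (by simp [hr]))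
        omega
    obtain ⟨v0, hv0⟩ : ∃ v0, dictGet? cov k0 = some v0 :=
      Option.isSome_iff_exists.mp ((dictGet?_isSome_iff cov k0).mpr hk0keys)
    -- reduce A to aClose over the scan, B to bClose over the grouping fold
    have hA : coverage_to_intervals cov
        = aClose Mv ((PySem.List.pyRange (k0 + 1) (Mv + 1) 1).foldl (aStep cov) ([], some v0, k0)) := by
      have hlen : ¬ (cov.length = 0) := by rw [hcov]; simp
      have hgl : (PySem.List.pyRange (k0 + 1) (Mv + 1) 1).getLast? = some Mv := by
        rw [PySem.List.pyRange_one_succ_right (by omega)]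
        exact List.getLast?_concat
      simp only [coverage_to_intervals, if_neg hlen, ← hkeys, hmin, hmax, Option.getD_some,
        hv0, hgl, aClose]
    have hB : coverage_to_intervals_alt cov
        = bClose (rest.foldl (bStep cov) ([], k0, k0, v0)) := by
      rw [hcov]
      simp only [coverage_to_intervals_alt, ← hcov, ← hkeys, hks, hv0, Option.getD_some, bClose]
    rw [hA, hB]
    have hmain := scan_eq_group cov rest (k0 + 1) k0 v0 [] hrestp
      (fun k hk => by have := hk0lt k hk; omega)
      (fun k hk => (dictGet?_isSome_iff cov k).mpr ((hmem k).mp (by simp [hk])))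
      (fun x hx1 hx2 hx3 => by
        refine dictGet?_eq_none cov x (fun hxk => ?_)
        have := (hmem x).mpr hxk
        rcases List.mem_cons.mp this with rfl | h
        · omega
        · exact hx3 h)
    rw [show k0 + 1 - 1 = k0 by omega] at hmain
    have hMveq : rest.getLastD k0 = Mv := by rw [hMv]; exact (List.getLastD_cons).symm
    rw [hMveq] at hmain
    exact hmain

-- ===== VERDICT (by name: the statement is the Claim_ definition above) =====
theorem coverage_to_intervals_spec : Claim_unchanged_coverage_to_intervals := by
  intro coverage _ hnd
  cases coverage with
  | nil => rfl
  | cons c t => exact coverage_to_intervals_eq_alt c t hnd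
theorem coverage_to_intervals_changed : Claim_changed_coverage_to_intervals := by
  unfold Claim_changed_coverage_to_intervals; decide
theorem coverage_to_intervals_tight : Claim_exact_coverage_to_intervals := by
  intro coverage _ hD
  obtain ⟨hne, hall⟩ := hD
  cases coverage with
  | nil => exact absurd rfl hne
  | cons c t =>
    set cov := c :: t with hcov
    set keys := cov.map Prod.fst with hkeys
    have hkeq : ∀ y ∈ keys, y = c.1 := by
      intro y hy
      rw [hkeys] at hy
      obtain ⟨p, hp, hp2⟩ := List.mem_map.mp hy
      rw [← hp2]
      exact hall p hp c (by simp [hcov])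
    have hc1 : c.1 ∈ keys := by rw [hkeys, hcov]; simp
    -- A returns []: min = max, so the loop range is empty and the final append is skipped
    have hmin : PySem.List.min? keys (fun x => x) = some c.1 := by
      cases h : PySem.List.min? keys (fun x => x) with
      | none => rw [PySem.List.min?_eq_none_iff] at h; rw [h] at hc1; simp at hc1
      | some m => rw [hkeq m (PySem.List.min?_mem h)]
    have hmax : PySem.List.max? keys (fun x => x) = some c.1 := by
      cases h : PySem.List.max? keys (fun x => x) with
      | none => rw [PySem.List.max?_eq_none_iff] at h; rw [h] at hc1; simp at hc1
      | some m => rw [hkeq m (PySem.List.max?_mem h)]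
    have hA : coverage_to_intervals cov = [] := by
      have hlen : ¬ (cov.length = 0) := by rw [hcov]; simp
      simp only [coverage_to_intervals, if_neg hlen, ← hkeys, hmin, hmax, Option.getD_some,
        PySem.List.pyRange_one_eq_nil (le_refl (c.1 + 1)), List.foldl_nil, List.getLast?_nil]
    -- B returns the one-point interval, in particular a nonempty list
    have hB : coverage_to_intervals_alt cov ≠ [] := by
      rw [hcov]
      simp only [coverage_to_intervals_alt, ← hcov, ← hkeys]
      cases hks : PySem.List.sorted (PySem.Set.ofList keys) (fun x => x) false with
      | nil =>
        exfalso
        have h1 : c.1 ∈ PySem.List.sorted (PySem.Set.ofList keys) (fun x => x) false := by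
          rw [PySem.List.mem_sorted, PySem.Set.mem_ofList]; exact hc1
        rw [hks] at h1; simp at h1
      | cons k0 rest => simp
    rw [hA]
    exact fun h => hB h.symm
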